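-- pv_equiv track=rewrite | github.com/pypi-data/pypi-mirror-395 | packages/neer-match-utilities/neer_match_utilities-1.0.26b0.tar.gz/neer_match_utilities-1.0.26b0/src/neer_match_utilities/prepare.py | similarity_map_to_dict
-- ===== SOURCE A (Python) =====
-- def similarity_map_to_dict(items: list) -> dict:
--     """
--     Convert a list of similarity mappings into a dictionary representation.
--
--     The function accepts a list of tuples, where each tuple represents a mapping
--     with the form `(left, right, similarity)`. If the left and right column names
--     are identical, the dictionary key is that column name; otherwise, the key is formed
--     as `left~right`.
--
--     Returns
--     -------
--     dict
--         A dictionary where keys are column names (or `left~right` for differing columns)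
--         and values are lists of similarity functions associated with those columns.
--     """
--     result = {}
--     for left, right, similarity in items:
--         # Use the left value as key if both columns are identical; otherwise, use 'left~right'
--         key = left if left == right else f"{left}~{right}"
--         if key in result:
--             result[key].append(similarity)
--         else:
--             result[key] = [similarity]
--     return result
-- ===== SOURCE B (Python) =====
-- def similarity_map_to_dict(items: list) -> dict:
--     """Recursive partition: take the first item's key, gather all its
--     similarities in one pass, and recurse on the remaining items."""
--     if not items:
--         return {}
--     left, right, similarity = items[0]
--     key = left if left == right else f"{left}~{right}"
--     rest = items[1:]
--     same = [s for l, r, s in rest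
--             if (l if l == r else f"{l}~{r}") == key]
--     others = [t for t in rest
--               if (t[0] if t[0] == t[1] else f"{t[0]}~{t[1]}") != key]
--     result = {key: [similarity] + same}
--     result.update(similarity_map_to_dict(others))
--     return result
-- ===== Notes on version B (the rewrite author's own statement) =====
-- stated objective: alternative
-- what changed: Replaced the incremental dict-insert loop by a recursive partition: the first item's key is computed once, all its similarities are gathered by a filter pass, and the function recurses on the items with other keys.
import Mathlib
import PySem

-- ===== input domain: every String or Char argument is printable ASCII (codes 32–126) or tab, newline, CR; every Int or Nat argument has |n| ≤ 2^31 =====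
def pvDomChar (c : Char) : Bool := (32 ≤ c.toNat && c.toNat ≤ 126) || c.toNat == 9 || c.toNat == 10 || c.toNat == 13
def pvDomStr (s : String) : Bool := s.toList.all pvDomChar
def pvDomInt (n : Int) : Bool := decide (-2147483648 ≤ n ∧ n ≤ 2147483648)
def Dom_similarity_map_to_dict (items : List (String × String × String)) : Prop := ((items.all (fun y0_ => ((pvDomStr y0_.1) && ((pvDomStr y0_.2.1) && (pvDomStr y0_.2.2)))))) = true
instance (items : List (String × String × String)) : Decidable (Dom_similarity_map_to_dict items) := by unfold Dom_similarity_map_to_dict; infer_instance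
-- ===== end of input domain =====

-- B replaces A's incremental dict-insert loop by a recursive partition on the first item's key (alternative decomposition, same return value).


-- ===== PORT A =====
-- key = left if left == right else f"{left}~{right}"   (shared by both ports)
def pvKey (t : String × String × String) : String :=
  if t.1 == t.2.1 then t.1 else t.1 ++ "~" ++ t.2.1

def similarity_map_to_dict (items : List (String × String × String)) : List (String × List String) :=
  (items.foldl (fun result t =>
      let key := pvKey t
      if result.contains key then result.modify key [] (· ++ [t.2.2])
      else result.insert key [t.2.2])
    PySem.Dict.empty).items

-- ===== PORT B =====
def similarity_map_to_dict_alt (items : List (String × String × String)) : List (String × List String) :=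
  match items with
  | [] => []
  | t :: rest =>
    let key := pvKey t
    let same := (rest.filter (fun u => pvKey u == key)).map (·.2.2)
    let others := rest.filter (fun u => pvKey u != key)
    (key, t.2.2 :: same) :: similarity_map_to_dict_alt others
termination_by items.length
decreasing_by
  simp only [List.length_cons, Nat.lt_succ_iff, List.length_unattach]
  exact le_trans (List.length_filter_le _ _) (le_of_eq List.length_attach)

-- ===== PRECONDITION & SPEC =====
def Spec_similarity_map_to_dict (items : List (String × String × String)) (out : List (String × List String)) : Prop := out = similarity_map_to_dict_alt items
instance (items : List (String × String × String)) (out : List (String × List String)) : Decidable (Spec_similarity_map_to_dict items out) := by unfold Spec_similarity_map_to_dict; infer_instance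

-- ===== CLAIM (what is proved, stated in full; the proofs are below) =====
def Claim_equal_similarity_map_to_dict : Prop := ∀ (items : List (String × String × String)), Dom_similarity_map_to_dict items → Spec_similarity_map_to_dict items (similarity_map_to_dict items)

-- ===== LEMMAS AND PROOFS =====

-- A's if/else loop body is exactly dict.modify key [] (· ++ [sim]).
theorem pv_step_eq (d : PySem.Dict String (List String)) (t : String × String × String) :
    (if d.contains (pvKey t) then d.modify (pvKey t) [] (· ++ [t.2.2])
     else d.insert (pvKey t) [t.2.2]) = d.modify (pvKey t) [] (· ++ [t.2.2]) := by
  by_cases h : d.contains (pvKey t) = true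
  · simp [h]
  · simp only [Bool.not_eq_true] at h
    simp [h, PySem.Dict.modify, PySem.Dict.getD_of_not_contains _ _ h]

-- grouping of a plain key/value pair list, with B's recursion shape
def pvGrp (ps : List (String × String)) : List (String × List String) :=
  match ps with
  | [] => []
  | (k, v) :: ps' =>
    (k, v :: (ps'.filter (fun q => q.1 == k)).map (·.2)) :: pvGrp (ps'.filter (fun q => q.1 != k))
termination_by ps.length
decreasing_by
  simp only [List.length_cons, Nat.lt_succ_iff, List.length_unattach]
  exact le_trans (List.length_filter_le _ _) (le_of_eq List.length_attach)

theorem pv_alt_eq_grp (items : List (String × String × String)) :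
    similarity_map_to_dict_alt items = pvGrp (items.map (fun t => (pvKey t, t.2.2))) := by
  induction items using similarity_map_to_dict_alt.induct with
  | case1 => simp [similarity_map_to_dict_alt, pvGrp]
  | case2 t rest key same ih =>
    simp only [same, key] at ih
    simp only [List.unattach_filter, List.unattach_attach] at ih
    simp only [similarity_map_to_dict_alt, pvGrp, List.map_cons, List.filter_map,
      List.map_map, Function.comp_def] at ih ⊢
    exact congrArg _ ih

theorem pv_discard_ofList (xs : List String) (x : String) :
    (PySem.Set.ofList xs).discard x = PySem.Set.ofList (xs.filter (fun y => y != x)) := by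
  induction xs with
  | nil => rfl
  | cons y ys ih =>
    by_cases h : y = x
    · subst h
      simp [PySem.Set.ofList_cons, PySem.Set.discard, List.filter_filter, ← ih]
    · simp only [PySem.Set.ofList_cons, List.filter_cons, PySem.Set.discard]
      simp [h, List.filter_filter, ← ih, PySem.Set.ofList_cons, PySem.Set.discard]
      exact List.filter_congr (fun a _ => Bool.and_comm _ _)

theorem pv_grp_spec (ps : List (String × String)) :
    pvGrp ps = (PySem.Set.ofList (ps.map (·.1))).map
      (fun k => (k, (ps.filter (fun q => q.1 == k)).map (·.2))) := by
  induction ps using pvGrp.induct with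
  | case1 => simp [pvGrp]
  | case2 k v ps' ih =>
    simp only [List.unattach_filter, List.unattach_attach] at ih
    rw [pvGrp, List.map_cons, PySem.Set.ofList_cons, List.map_cons]
    have hdis : (PySem.Set.ofList (ps'.map (·.1))).discard k
        = PySem.Set.ofList ((ps'.filter (fun q => q.1 != k)).map (·.1)) := by
      rw [pv_discard_ofList, List.filter_map]; rfl
    rw [hdis, ih]
    congr 1
    · simp
    · refine List.map_congr_left ?_
      intro c hc
      have hck : c ≠ k := by
        rcases List.mem_map.1 ((PySem.Set.mem_ofList _ _).1 hc) with ⟨q, hq, rfl⟩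
        simpa using List.of_mem_filter hq
      simp only [List.filter_cons, List.filter_filter]
      rw [if_neg (by simpa using fun h => hck h.symm)]
      refine congrArg _ (congrArg (List.map (fun x : String × String => x.2))
        (List.filter_congr (fun (a : String × String) _ => ?_)))
      by_cases hac : a.1 = c <;> simp [hac, hck]

theorem pv_a_spec (items : List (String × String × String)) :
    similarity_map_to_dict items =
      (PySem.Set.ofList (items.map pvKey)).map
        (fun k => (k, ((items.map (fun t => (pvKey t, t.2.2))).filter (fun q => q.1 == k)).map (·.2))) := by
  unfold similarity_map_to_dict
  have hfun : ∀ (d : PySem.Dict String (List String)) (t : String × String × String),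
      (let key := pvKey t
       if d.contains key then d.modify key [] (· ++ [t.2.2]) else d.insert key [t.2.2])
      = d.modify (pvKey t) [] (· ++ [t.2.2]) := fun d t => pv_step_eq d t
  rw [funext (fun d => funext (fun t => hfun d t))]
  have hrw : List.foldl (fun d t => d.modify (pvKey t) [] fun x => x ++ [t.2.2]) PySem.Dict.empty items
      = List.foldl (fun d (p : String × String) => d.modify p.1 [] fun x => x ++ [p.2]) PySem.Dict.empty
          (items.map (fun t => (pvKey t, t.2.2))) :=
    (List.foldl_map (f := fun t : String × String × String => (pvKey t, t.2.2))
      (g := fun (d : PySem.Dict String (List String)) (p : String × String) => d.modify p.1 [] fun x => x ++ [p.2])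
      (l := items) (init := PySem.Dict.empty)).symm
  rw [hrw]
  have hnodup : ((items.map (fun t => (pvKey t, t.2.2))).foldl
      (fun d (p : String × String) => d.modify p.1 [] fun x => x ++ [p.2]) PySem.Dict.empty).keys.Nodup :=
    PySem.Dict.nodup_keys_foldl_modify_key _ (fun p : String × String => p.1) [] (fun _ (p : String × String) v => v ++ [p.2]) _ (by simp)
  rw [PySem.Dict.items_eq_map_keys _ hnodup []]
  rw [PySem.Dict.keys_foldl_modify_key _ (fun p : String × String => p.1) [] (fun _ (p : String × String) v => v ++ [p.2])]
  rw [show PySem.Dict.empty.keys = ([] : List String) from rfl, PySem.Set.update_nil_left]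
  rw [show (items.map (fun t => (pvKey t, t.2.2))).map (·.1) = items.map pvKey by
    simp [List.map_map, Function.comp_def]]
  refine List.map_congr_left (fun c _ => ?_)
  rw [PySem.Dict.getD_foldl_modify_append]
  simp

-- ===== VERDICT (by name: the statement is the Claim_ definition above) =====
theorem similarity_map_to_dict_spec : Claim_equal_similarity_map_to_dict := by
  intro items _
  show _ = _
  rw [pv_a_spec, pv_alt_eq_grp, pv_grp_spec]
  simp [List.map_map, Function.comp_def]
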